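-- pv_equiv track=rewrite | github.com/transys-project/afr | sim/algorithm.py | map_seq_idx_array_producer
-- ===== SOURCE A (Python) =====
-- TARGET_ARRIVAL_INTERVAL = [1.0/60, 1.0/48, 1.0/36, 1.0/24]
--
-- def map_seq_idx_array_producer(seq_len):
--     result_array = []
--     if seq_len < len(TARGET_ARRIVAL_INTERVAL): # can't map seq Surjective onto target_arriv
--         return []
--
--     # get every  valid combination  (monotone increase)
--     map_seq_partition_comb_list = [0 for _ in range(len(TARGET_ARRIVAL_INTERVAL) - 1)]
--     # -1: n items need (n-1) parting line
--
--     # init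
--     map_seq_partition_comb_list[-1] = (seq_len-1) -1 # final parting line is set, because [0,(N item),max,max] is equal to [0,(N item),MAX]
--     for idx in range(len(map_seq_partition_comb_list)):
--         map_seq_partition_comb_list[-1 - idx] = map_seq_partition_comb_list[-1] - idx # start from [0,.., MAX-1, MAX]
--
--     defalt_map_seq_partition_comb_list = [item for item in map_seq_partition_comb_list]
--     # get every combination
--     while(map_seq_partition_comb_list[0] >= 0):
--         seq_idx_array = [0 for _ in range(seq_len)]
--         comb_list_idx = 0
--         target_arriv_idx = 0
--         for idx in range(len(seq_idx_array)): # seq_idx_array[0] = 0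
--             if idx > map_seq_partition_comb_list[comb_list_idx]:
--                 comb_list_idx = min(comb_list_idx+1, len(map_seq_partition_comb_list)-1)
--                 target_arriv_idx = min(target_arriv_idx+1, len(TARGET_ARRIVAL_INTERVAL)-1)
--             seq_idx_array[idx] = target_arriv_idx
--         result_array.append([item for item in seq_idx_array]) # deep copy
--
--         # next combination
--         is_continue = True
--         comb_list_moving_offset = len(map_seq_partition_comb_list)-1 - 1
--         while(is_continue):
--             is_continue = False
--             map_seq_partition_comb_list[comb_list_moving_offset] -= 1
--             if comb_list_moving_offset == 0:
--                 if map_seq_partition_comb_list[comb_list_moving_offset] < 0: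
--                     break
--             else:
--                 if map_seq_partition_comb_list[comb_list_moving_offset] <= map_seq_partition_comb_list[comb_list_moving_offset - 1]: # can't partition in same location
--                     map_seq_partition_comb_list[comb_list_moving_offset] = defalt_map_seq_partition_comb_list[comb_list_moving_offset]
--                     comb_list_moving_offset -= 1
--                     is_continue = True
--
--     return result_array
-- ===== SOURCE B (Python) =====
-- def map_seq_idx_array_producer(seq_len):
--     # Enumerate the three cut positions directly: the last cut is fixed at
--     # seq_len-2 (the [..,max,max]==[..,MAX] collapse), and the first two cuts
--     # (c0,c1) with 0 <= c0 < c1 <= seq_len-3 are walked in descending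
--     # lexicographic order, each row built by slab concatenation.
--     if seq_len < 4:
--         return []
--     out = []
--     for c0 in range(seq_len - 4, -1, -1):
--         for c1 in range(seq_len - 3, c0, -1):
--             out.append([0] * (c0 + 1) + [1] * (c1 - c0)
--                        + [2] * (seq_len - 2 - c1) + [3])
--     return out
-- ===== Notes on version B (the rewrite author's own statement) =====
-- stated objective: simpler
-- what changed: Replaces the hand-rolled descending odometer over a mutable cut list and the per-index group-tracking scan with a direct nested enumeration of the two free cut positions in descending lex order, building each row by slab concatenation.
import Mathlib
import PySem

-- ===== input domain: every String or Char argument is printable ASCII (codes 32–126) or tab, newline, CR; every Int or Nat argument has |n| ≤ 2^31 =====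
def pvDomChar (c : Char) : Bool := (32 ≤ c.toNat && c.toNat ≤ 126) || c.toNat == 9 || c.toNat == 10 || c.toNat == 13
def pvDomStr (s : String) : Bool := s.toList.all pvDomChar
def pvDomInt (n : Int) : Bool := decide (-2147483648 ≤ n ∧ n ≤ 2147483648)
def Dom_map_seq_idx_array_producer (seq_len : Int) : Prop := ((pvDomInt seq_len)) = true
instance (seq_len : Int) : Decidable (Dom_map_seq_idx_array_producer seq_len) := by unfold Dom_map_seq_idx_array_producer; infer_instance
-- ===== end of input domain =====

-- B replaces A's mutable-cut-list odometer and per-index group-tracking scan by a direct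
-- descending enumeration of the two free cut positions, building each row by slab concatenation.

-- ===== PORT A =====
-- TARGET_ARRIVAL_INTERVAL has length 4; only its length is used by the function.
-- One step of `for idx in range(seq_len)` filling seq_idx_array; the writes
-- seq_idx_array[idx] = target_arriv_idx happen in increasing index order, so the
-- preallocated array is rendered by appending each written value in order (exact).
def pvStepA (comb : List Int) (s : Int × Int × List Int) (idx : Int) : Int × Int × List Int :=
  let c := s.1; let t := s.2.1; let arr := s.2.2
  if idx > PySem.List.pyGetD comb c 0 then  -- comb_list_idx is always in range (0..2)
    let c' := min (c + 1) (3 - 1)           -- len(map_seq_partition_comb_list) - 1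
    let t' := min (t + 1) (4 - 1)           -- len(TARGET_ARRIVAL_INTERVAL) - 1
    (c', t', arr ++ [t'])
  else (c, t, arr ++ [t])

def pvRowA (seq_len : Int) (comb : List Int) : List Int :=
  ((PySem.List.pyRange 0 seq_len 1).foldl (pvStepA comb) (0, 0, [])).2.2

-- the inner `while is_continue` odometer step; `offset` is comb_list_moving_offset,
-- which strictly decreases on each continued iteration (that is the recursion).
def pvNextA (dflt : List Int) : List Int → Nat → List Int
  | comb, 0 =>
      comb.set 0 (PySem.List.pyGetD comb 0 0 - 1)   -- break / exit: outer while re-checks comb[0]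
  | comb, (o+1) =>
      let comb' := comb.set (o+1) (PySem.List.pyGetD comb ((o:Int)+1) 0 - 1)
      if PySem.List.pyGetD comb' ((o:Int)+1) 0 ≤ PySem.List.pyGetD comb' (o:Int) 0 then
        pvNextA dflt (comb'.set (o+1) (PySem.List.pyGetD dflt ((o:Int)+1) 0)) o
      else comb'

-- the outer `while comb[0] >= 0`; fuel only totalizes the loop (it is chosen large enough).
def pvLoopA (seq_len : Int) (dflt : List Int) : List Int → List (List Int) → Nat → List (List Int)
  | _, res, 0 => res
  | comb, res, (f+1) =>
      if PySem.List.pyGetD comb 0 0 ≥ 0 then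
        pvLoopA seq_len dflt (pvNextA dflt comb (3 - 1 - 1)) (res ++ [pvRowA seq_len comb]) f
      else res

def map_seq_idx_array_producer (seq_len : Int) : List (List Int) :=
  if seq_len < 4 then [] else
    let comb0 : List Int := [0, 0, 0]
    let comb1 := comb0.set (3 - 1) ((seq_len - 1) - 1)
    -- for idx in range(3): comb[-1-idx] = comb[-1] - idx   (negative indices, list length 3)
    let comb2 := (PySem.List.pyRange 0 3 1).foldl
      (fun c idx => PySem.List.pySetD c (-1 - idx) (PySem.List.pyGetD c (-1) 0 - idx)) comb1
    pvLoopA seq_len comb2 comb2 [] (seq_len * seq_len).toNat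

-- ===== PORT B =====
def map_seq_idx_array_producer_alt (seq_len : Int) : List (List Int) :=
  if seq_len < 4 then [] else
    (PySem.List.pyRange (seq_len - 4) (-1) (-1)).foldl (fun out c0 =>
      (PySem.List.pyRange (seq_len - 3) c0 (-1)).foldl (fun out c1 =>
        out ++ [List.replicate (c0 + 1).toNat 0 ++ List.replicate (c1 - c0).toNat 1
                ++ List.replicate (seq_len - 2 - c1).toNat 2 ++ [3]]) out) []

-- ===== PRECONDITION & SPEC =====
def Spec_map_seq_idx_array_producer (seq_len : Int) (out : List (List Int)) : Prop := out = map_seq_idx_array_producer_alt seq_len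
instance (seq_len : Int) (out : List (List Int)) : Decidable (Spec_map_seq_idx_array_producer seq_len out) := by unfold Spec_map_seq_idx_array_producer; infer_instance

-- ===== CLAIM (what is proved, stated in full; the proofs are below) =====
def Claim_equal_map_seq_idx_array_producer : Prop := ∀ (seq_len : Int), Dom_map_seq_idx_array_producer seq_len → Spec_map_seq_idx_array_producer seq_len (map_seq_idx_array_producer seq_len)

-- ===== LEMMAS AND PROOFS =====

-- the slab row for cuts (c0, c1, n-2)
def pvRowB (n c0 c1 : Int) : List Int :=
  List.replicate (c0 + 1).toNat 0 ++ List.replicate (c1 - c0).toNat 1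
    ++ List.replicate (n - 2 - c1).toNat 2 ++ [3]

-- the common enumeration: rows from state (a, b), walking (a, b) down lexicographically
def pvG (n a b : Int) : List (List Int) :=
  if a < 0 then [] else
    pvRowB n a b :: (if b - 1 > a then pvG n a (b - 1) else pvG n (a - 1) (n - 3))
termination_by ((a + 1).toNat, (b - a).toNat)
decreasing_by
  · apply Prod.Lex.right' <;> omega
  · apply Prod.Lex.left; omega

lemma pvG_neg (n a b : Int) (h : a < 0) : pvG n a b = [] := by
  rw [pvG]; simp [h]

lemma pvG_pos (n a b : Int) (h : 0 ≤ a) :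
    pvG n a b = pvRowB n a b :: (if b - 1 > a then pvG n a (b - 1) else pvG n (a - 1) (n - 3)) := by
  rw [pvG]; simp [not_lt.mpr h]

lemma pvGetD0 (a b c : Int) : PySem.List.pyGetD [a, b, c] 0 0 = a := by simp [pysem]
lemma pvGetD1 (a b c : Int) : PySem.List.pyGetD [a, b, c] 1 0 = b := by simp [pysem]
lemma pvGetD2 (a b c : Int) : PySem.List.pyGetD [a, b, c] 2 0 = c := by simp [pysem]

-- no-bump segment of the row-building loop
lemma pvSeg (comb : List Int) (c t : Int) :
    ∀ (k : Nat) (lo hi : Int) (arr : List Int), hi - lo = k →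
      (∀ i : Int, lo ≤ i → i < hi → i ≤ PySem.List.pyGetD comb c 0) →
      (PySem.List.pyRange lo hi 1).foldl (pvStepA comb) (c, t, arr)
        = (c, t, arr ++ List.replicate (hi - lo).toNat t) := by
  intro k
  induction k with
  | zero =>
    intro lo hi arr hk h
    rw [PySem.List.pyRange_one_eq_nil (by omega)]
    simp [show (hi - lo).toNat = 0 by omega]
  | succ k ih =>
    intro lo hi arr hk h
    rw [PySem.List.pyRange_one_cons (by omega)]
    simp only [List.foldl_cons]
    have hle : ¬ lo > PySem.List.pyGetD comb c 0 := not_lt.mpr (h lo le_rfl (by omega))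
    rw [show pvStepA comb (c, t, arr) lo = (c, t, arr ++ [t]) by simp [pvStepA, hle]]
    rw [ih (lo + 1) hi (arr ++ [t]) (by omega) (fun i h1 h2 => h i (by omega) h2)]
    rw [show (hi - lo).toNat = (hi - (lo + 1)).toNat + 1 by omega]
    simp [List.replicate_succ]

-- the row A builds from comb [a, b, n-2] is B's slab row
lemma pvRowA_eq (n a b : Int) (ha : 0 ≤ a) (hab : a < b) (hb : b ≤ n - 3) :
    pvRowA n [a, b, n - 2] = pvRowB n a b := by
  unfold pvRowA
  rw [PySem.List.pyRange_one_append 0 (a + 1) n (by omega) (by omega), List.foldl_append]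
  rw [pvSeg [a, b, n - 2] 0 0 (a + 1 - 0).toNat 0 (a + 1) [] (by omega)
      (fun i h1 h2 => by rw [pvGetD0]; omega)]
  rw [PySem.List.pyRange_one_cons (show a + 1 < n by omega)]
  simp only [List.foldl_cons]
  rw [show pvStepA [a, b, n - 2] (0, 0, [] ++ List.replicate (a + 1 - 0).toNat 0) (a + 1)
        = (1, 1, [] ++ List.replicate (a + 1 - 0).toNat 0 ++ [1]) by
      simp [pvStepA]]
  rw [PySem.List.pyRange_one_append (a + 1 + 1) (b + 1) n (by omega) (by omega), List.foldl_append]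
  rw [pvSeg [a, b, n - 2] 1 1 (b + 1 - (a + 1 + 1)).toNat (a + 1 + 1) (b + 1) _ (by omega)
      (fun i h1 h2 => by rw [pvGetD1]; omega)]
  rw [PySem.List.pyRange_one_cons (show b + 1 < n by omega)]
  simp only [List.foldl_cons]
  rw [show pvStepA [a, b, n - 2]
        (1, 1, [] ++ List.replicate (a + 1 - 0).toNat 0 ++ [1]
                ++ List.replicate (b + 1 - (a + 1 + 1)).toNat 1) (b + 1)
        = (2, 2, [] ++ List.replicate (a + 1 - 0).toNat 0 ++ [1]
                ++ List.replicate (b + 1 - (a + 1 + 1)).toNat 1 ++ [2]) by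
      simp [pvStepA, pvGetD1]]
  rw [PySem.List.pyRange_one_append (b + 1 + 1) (n - 1) n (by omega) (by omega), List.foldl_append]
  rw [pvSeg [a, b, n - 2] 2 2 (n - 1 - (b + 1 + 1)).toNat (b + 1 + 1) (n - 1) _ (by omega)
      (fun i h1 h2 => by rw [pvGetD2]; omega)]
  rw [PySem.List.pyRange_one_cons (show n - 1 < n by omega),
      show PySem.List.pyRange (n - 1 + 1) n 1 = [] from
        PySem.List.pyRange_one_eq_nil (by omega)]
  simp only [List.foldl_cons, List.foldl_nil]
  have hstep : ∀ arr : List Int, pvStepA [a, b, n - 2] (2, 2, arr) (n - 1) = (2, 3, arr ++ [3]) := by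
    intro arr; simp [pvStepA, pvGetD2]
  rw [hstep]
  unfold pvRowB
  rw [show (b - a).toNat = (b + 1 - (a + 1 + 1)).toNat + 1 by omega,
      show (n - 2 - b).toNat = (n - 1 - (b + 1 + 1)).toNat + 1 by omega]
  simp [List.replicate_succ, show (a + 1 - 0) = a + 1 by ring]

-- A's odometer step from [a, b, n-2]
lemma pvNextA_eq (n a b : Int) :
    pvNextA [n - 4, n - 3, n - 2] [a, b, n - 2] 1
      = if b - 1 > a then [a, b - 1, n - 2] else [a - 1, n - 3, n - 2] := by
  show pvNextA [n - 4, n - 3, n - 2] [a, b, n - 2] (0 + 1) = _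
  rw [pvNextA]
  by_cases h : b - 1 > a
  · rw [if_pos h]
    simp only [List.set, pvGetD1, Nat.cast_zero, zero_add, pvGetD0]
    rw [if_neg (by omega)]
  · rw [if_neg h]
    simp only [List.set, pvGetD1, Nat.cast_zero, zero_add, pvGetD0]
    rw [if_pos (by omega)]
    rw [pvNextA]
    simp [List.set]

-- length bound for pvG, to pick sufficient fuel
lemma pvG_len (n : Int) (hn : 4 ≤ n) :
    ∀ (f : Nat) (a b : Int), a < b → b ≤ n - 3 → ((a + 1) * n + b + 1).toNat ≤ f →
      (pvG n a b).length ≤ f := by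
  intro f
  induction f with
  | zero =>
    intro a b hab hb hf
    by_cases ha : a < 0
    · simp [pvG_neg n a b ha]
    · exfalso
      have h1 : 1 * n ≤ (a + 1) * n := by
        apply mul_le_mul_of_nonneg_right <;> omega
      omega
  | succ f ih =>
    intro a b hab hb hf
    by_cases ha : a < 0
    · simp [pvG_neg n a b ha]
    · rw [pvG_pos n a b (by omega)]
      have hm : 0 ≤ (a + 1) * n := mul_nonneg (by omega) (by omega)
      by_cases h2 : b - 1 > a
      · rw [if_pos h2]
        have := ih a (b - 1) (by omega) (by omega) (by omega)
        simpa using by omega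
      · rw [if_neg h2]
        have hm2 : 0 ≤ a * n := mul_nonneg (by omega) (by omega)
        have he : (a + 1) * n = a * n + n := by ring
        have he2 : (a - 1 + 1) * n = a * n := by ring
        have := ih (a - 1) (n - 3) (by omega) (by omega) (by omega)
        simpa using by omega

-- A's loop computes pvG
lemma pvLoopA_eq (n : Int) :
    ∀ (f : Nat) (a b : Int) (res : List (List Int)), 0 ≤ a + 1 → a < b → b ≤ n - 3 →
      (pvG n a b).length ≤ f →
      pvLoopA n [n - 4, n - 3, n - 2] [a, b, n - 2] res f = res ++ pvG n a b := by
  intro f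
  induction f with
  | zero =>
    intro a b res _ hab hb hf
    have : pvG n a b = [] := by
      by_cases ha : a < 0
      · exact pvG_neg n a b ha
      · rw [pvG_pos n a b (by omega)] at hf; simp at hf
    simp [pvLoopA, this]
  | succ f ih =>
    intro a b res _ hab hb hf
    by_cases ha : a < 0
    · rw [pvLoopA, if_neg (by rw [pvGetD0]; omega), pvG_neg n a b ha]
      simp
    · rw [pvLoopA, if_pos (by rw [pvGetD0]; omega)]
      rw [show (3 - 1 - 1 : Nat) = 1 by norm_num, pvNextA_eq n a b,
          pvRowA_eq n a b (by omega) hab hb]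
      rw [pvG_pos n a b (by omega)] at hf ⊢
      simp only [List.length_cons] at hf
      by_cases h2 : b - 1 > a
      · rw [if_pos h2] at hf ⊢
        rw [if_pos h2, ih a (b - 1) (res ++ [pvRowB n a b]) (by omega) (by omega) (by omega)
            (by omega)]
        simp
      · rw [if_neg h2] at hf ⊢
        rw [if_neg h2, ih (a - 1) (n - 3) (res ++ [pvRowB n a b]) (by omega) (by omega) (by omega)
            (by omega)]
        simp

-- B's inner fold is a map (cited library shape)
lemma pvInner_eq (n c0 b : Int) (out : List (List Int)) :
    (PySem.List.pyRange b c0 (-1)).foldl (fun o c1 =>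
        o ++ [List.replicate (c0 + 1).toNat 0 ++ List.replicate (c1 - c0).toNat 1
              ++ List.replicate (n - 2 - c1).toNat 2 ++ [3]]) out
      = out ++ (PySem.List.pyRange b c0 (-1)).map (pvRowB n c0) := by
  exact PySem.List.foldl_append_singleton_eq_map (pvRowB n c0) _ out

-- pvG from a full inner sweep splits off one map
lemma pvG_maps (n a : Int) :
    ∀ (k : Nat) (b : Int), (b - a).toNat ≤ k → 0 ≤ a → a < b → b ≤ n - 3 →
      pvG n a b = (PySem.List.pyRange b a (-1)).map (pvRowB n a) ++ pvG n (a - 1) (n - 3) := by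
  intro k
  induction k with
  | zero => intro b hk ha hab hb; omega
  | succ k ih =>
    intro b hk ha hab hb
    rw [pvG_pos n a b ha, PySem.List.pyRange_neg_one_cons hab]
    by_cases h2 : b - 1 > a
    · rw [if_pos h2, ih (b - 1) (by omega) ha (by omega) (by omega)]
      simp
    · rw [if_neg h2, PySem.List.pyRange_neg_one_eq_nil (show b - 1 ≤ a by omega)]
      simp

-- B's nested folds compute pvG
lemma pvOuter_eq (n : Int) :
    ∀ (k : Nat) (a : Int) (out : List (List Int)), (a + 1).toNat ≤ k → a ≤ n - 4 →
      (PySem.List.pyRange a (-1) (-1)).foldl (fun out c0 =>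
          (PySem.List.pyRange (n - 3) c0 (-1)).foldl (fun o c1 =>
            o ++ [List.replicate (c0 + 1).toNat 0 ++ List.replicate (c1 - c0).toNat 1
                  ++ List.replicate (n - 2 - c1).toNat 2 ++ [3]]) out) out
        = out ++ pvG n a (n - 3) := by
  intro k
  induction k with
  | zero =>
    intro a out hk ha
    rw [PySem.List.pyRange_neg_one_eq_nil (show a ≤ -1 by omega), pvG_neg n a _ (by omega)]
    simp
  | succ k ih =>
    intro a out hk ha
    by_cases hneg : a < 0
    · rw [PySem.List.pyRange_neg_one_eq_nil (show a ≤ -1 by omega), pvG_neg n a _ hneg]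
      simp
    · rw [PySem.List.pyRange_neg_one_cons (show -1 < a by omega)]
      simp only [List.foldl_cons]
      rw [pvInner_eq n a (n - 3) out]
      rw [ih (a - 1) _ (by omega) (by omega)]
      rw [pvG_maps n a ((n - 3 - a).toNat) (n - 3) le_rfl (by omega) (by omega) le_rfl]
      simp

-- ===== VERDICT (by name: the statement is the Claim_ definition above) =====
theorem map_seq_idx_array_producer_spec : Claim_equal_map_seq_idx_array_producer := by
  intro n _
  unfold Spec_map_seq_idx_array_producer
  by_cases h : n < 4
  · simp [map_seq_idx_array_producer, map_seq_idx_array_producer_alt, h]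
  · have hn : 4 ≤ n := by omega
    have hinit : (PySem.List.pyRange 0 3 1).foldl
        (fun c idx => PySem.List.pySetD c (-1 - idx) (PySem.List.pyGetD c (-1) 0 - idx))
        (([0, 0, 0] : List Int).set (3 - 1) ((n - 1) - 1)) = [n - 4, n - 3, n - 2] := by
      rw [show PySem.List.pyRange 0 3 1 = [0, 1, 2] by decide]
      norm_num [PySem.List.pySetD, PySem.List.pySet?, PySem.List.pyIdx?, PySem.List.pyGetD,
        PySem.List.pyGet?, List.set]
      norm_num [show (3 - Int.toNat 2) = 1 from rfl, List.set]
      refine ⟨by ring, by ring, by ring⟩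
    rw [map_seq_idx_array_producer, map_seq_idx_array_producer_alt, if_neg h, if_neg h]
    simp only [hinit]
    rw [pvLoopA_eq n ((n * n).toNat) (n - 4) (n - 3) [] (by omega) (by omega) (by omega)
        (by
          apply pvG_len n hn _ (n - 4) (n - 3) (by omega) (by omega)
          have hh : (n - 4 + 1) * n = n * n - 3 * n := by ring
          have hnn : 0 ≤ n * n := mul_self_nonneg n
          omega)]
    rw [pvOuter_eq n ((n - 4 + 1).toNat) (n - 4) [] le_rfl le_rfl]
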